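-- pv_equiv track=rewrite | github.com/m4sango/aimahjong | agari.py | chk_n_anko_huro
-- ===== SOURCE A (Python) =====
-- def chk_n_anko_huro(huro: list, n=0):
--     if len(huro) == 0:
--         return n
--     hr = huro[0]
--     h = hr[0]
--     if 3 <= hr.count(h) <= 4:
--         return chk_n_anko_huro(huro[1:], n + 1)
--     else:
--         return chk_n_anko_huro(huro[1:], n)
-- ===== SOURCE B (Python) =====
-- def _is_anko(hr):
--     return 3 <= hr.count(hr[0]) <= 4
--
--
-- def chk_n_anko_huro(huro: list, n=0):
--     return n + len(list(filter(_is_anko, huro)))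
-- ===== Notes on version B (the rewrite author's own statement) =====
-- stated objective: simpler
-- what changed: Replaces A's recursion on huro[1:] carrying an accumulator with a filter-then-length formulation: select the melds whose first tile occurs 3-4 times and add the length of that selection to n.
import Mathlib
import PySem

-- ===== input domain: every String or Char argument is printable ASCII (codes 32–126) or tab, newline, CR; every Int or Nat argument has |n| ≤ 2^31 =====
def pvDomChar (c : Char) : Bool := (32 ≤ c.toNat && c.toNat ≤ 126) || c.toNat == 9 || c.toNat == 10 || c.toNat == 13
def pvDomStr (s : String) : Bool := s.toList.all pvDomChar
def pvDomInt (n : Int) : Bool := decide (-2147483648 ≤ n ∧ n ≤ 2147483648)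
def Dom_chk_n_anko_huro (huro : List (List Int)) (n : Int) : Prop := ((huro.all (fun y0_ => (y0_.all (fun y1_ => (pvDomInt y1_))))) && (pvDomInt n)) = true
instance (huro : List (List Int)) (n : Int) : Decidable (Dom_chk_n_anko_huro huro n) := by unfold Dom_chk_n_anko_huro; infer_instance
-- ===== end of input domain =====

-- B replaces A's accumulator recursion on huro[1:] with filter-then-length; objective: simpler.
-- ===== PORT A =====
-- literal recursion of A: take the first meld, test the count of its first tile, recurse on the tail
def chk_n_anko_huro (huro : List (List Int)) (n : Int) : Int :=
  match huro with
  | [] => n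
  | hr :: rest =>
    match PySem.List.pyGet? hr 0 with
    | none => 0   -- hr[0] raises IndexError in Python; excluded by Pre_
    | some h =>
      if 3 ≤ PySem.List.count hr h ∧ PySem.List.count hr h ≤ 4 then
        chk_n_anko_huro rest (n + 1)
      else
        chk_n_anko_huro rest n

-- ===== PORT B =====
-- _is_anko from Source B (hr[0] on an empty meld raises in Python; excluded by Pre_, false here)
def pvIsAnko (hr : List Int) : Bool :=
  match PySem.List.pyGet? hr 0 with
  | none => false
  | some h => decide (3 ≤ PySem.List.count hr h ∧ PySem.List.count hr h ≤ 4)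

-- literal port of Source B: n + len(filter(_is_anko, huro))
def chk_n_anko_huro_alt (huro : List (List Int)) (n : Int) : Int :=
  n + Int.ofNat (huro.filter pvIsAnko).length

-- ===== PRECONDITION & SPEC =====
-- Pre_ excludes huro containing an empty meld: there hr[0] raises IndexError in both A and B.
def Pre_chk_n_anko_huro (huro : List (List Int)) (n : Int) : Prop :=
  ∀ hr ∈ huro, hr ≠ []
instance (huro : List (List Int)) (n : Int) : Decidable (Pre_chk_n_anko_huro huro n) := by unfold Pre_chk_n_anko_huro; infer_instance
def pvWitness_chk_n_anko_huro : List (List Int) × Int := ([[5, 5, 5], [1, 2, 3]], 0)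

def Spec_chk_n_anko_huro (huro : List (List Int)) (n : Int) (out : Int) : Prop := out = chk_n_anko_huro_alt huro n
instance (huro : List (List Int)) (n : Int) (out : Int) : Decidable (Spec_chk_n_anko_huro huro n out) := by unfold Spec_chk_n_anko_huro; infer_instance

-- ===== CLAIM =====
def Claim_equal_chk_n_anko_huro : Prop := ∀ (huro : List (List Int)) (n : Int), Dom_chk_n_anko_huro huro n → Pre_chk_n_anko_huro huro n → Spec_chk_n_anko_huro huro n (chk_n_anko_huro huro n)

-- ===== LEMMAS AND PROOFS =====
theorem main_eq (huro : List (List Int)) (n : Int)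
    (hpre : ∀ hr ∈ huro, hr ≠ []) :
    chk_n_anko_huro huro n = chk_n_anko_huro_alt huro n := by
  induction huro generalizing n with
  | nil => simp [chk_n_anko_huro, chk_n_anko_huro_alt]
  | cons hr rest ih =>
    have hne : hr ≠ [] := hpre hr (by simp)
    have hrest : ∀ x ∈ rest, x ≠ [] := fun x hx => hpre x (by simp [hx])
    obtain ⟨a, t, rfl⟩ : ∃ a t, hr = a :: t := by
      cases hr with
      | nil => exact absurd rfl hne
      | cons a t => exact ⟨a, t, rfl⟩
    have hget : PySem.List.pyGet? (a :: t) 0 = some a := by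
      simp [PySem.List.pyGet?, PySem.List.pyIdx?]
    simp only [chk_n_anko_huro, hget]
    split_ifs with hc
    · rw [ih (n + 1) hrest]
      simp only [chk_n_anko_huro_alt, List.filter_cons, pvIsAnko, hget]
      rw [decide_eq_true hc]
      simp only [if_pos, List.length_cons, Int.ofNat_eq_natCast]
      push_cast
      ring
    · rw [ih n hrest]
      simp only [chk_n_anko_huro_alt, List.filter_cons, pvIsAnko, hget]
      rw [decide_eq_false hc]
      simp

-- ===== VERDICT =====
theorem chk_n_anko_huro_spec : Claim_equal_chk_n_anko_huro := by
  intro huro n _ hpre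
  unfold Spec_chk_n_anko_huro
  exact main_eq huro n hpre
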